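-- pv_equiv track=rewrite | github.com/pavelsinkevich/leetcode | Top interview 150/Matrix/36. Valid Sudoku.py | isValidSubSet
-- ===== SOURCE A (Python) =====
-- def isValidSubSet(subset):
--     items = dict()
--     for element in subset:
--         if element != ".":
--             if element in items:
--                 return False
--             else:
--                 items[element] = True
--     return True
-- ===== SOURCE B (Python) =====
-- def isValidSubSet(subset):
--     if not subset:
--         return True
--     head, rest = subset[0], subset[1:]
--     return (head == "." or head not in rest) and isValidSubSet(rest)
-- ===== Notes on version B (the rewrite author's own statement) =====
-- stated objective: alternative
-- what changed: Replaced A's single pass with a dict of seen elements and early return by a hash-free structural recursion that compares the head against the rest of the list and recurses on the tail; no auxiliary data structure is kept.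
import Mathlib
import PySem

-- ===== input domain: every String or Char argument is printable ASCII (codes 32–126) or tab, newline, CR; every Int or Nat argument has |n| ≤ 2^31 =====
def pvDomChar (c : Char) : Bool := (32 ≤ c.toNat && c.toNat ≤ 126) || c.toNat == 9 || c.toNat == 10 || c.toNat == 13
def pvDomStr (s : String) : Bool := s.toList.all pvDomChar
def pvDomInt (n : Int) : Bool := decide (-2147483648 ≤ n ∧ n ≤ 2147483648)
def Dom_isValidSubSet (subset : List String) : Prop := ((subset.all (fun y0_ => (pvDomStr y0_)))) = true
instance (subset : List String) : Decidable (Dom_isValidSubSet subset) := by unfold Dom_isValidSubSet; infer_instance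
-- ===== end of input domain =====

-- B drops A's dict-of-seen-elements scan for a hash-free structural recursion: compare the
-- head with the rest of the list, recurse on the tail (alternative decomposition).

-- ===== PORT A =====
-- literal port of A: loop over subset with a dict, early return False on a repeated non-dot element
def isValidSubSetGo (items : PySem.Dict String Bool) : List String → Bool
  | [] => true
  | e :: rest =>
      if e ≠ "." then
        if items.contains e then false
        else isValidSubSetGo (items.insert e true) rest
      else isValidSubSetGo items rest

def isValidSubSet (subset : List String) : Bool :=
  isValidSubSetGo PySem.Dict.empty subset

-- ===== PORT B =====
-- literal port of Source B: empty → True; else (head == "." or head not in rest) and recurse on rest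
def isValidSubSet_alt : List String → Bool
  | [] => true
  | head :: rest => (head == "." || !(rest.contains head)) && isValidSubSet_alt rest

-- ===== PRECONDITION & SPEC =====
def Spec_isValidSubSet (subset : List String) (out : Bool) : Prop := out = isValidSubSet_alt subset
instance (subset : List String) (out : Bool) : Decidable (Spec_isValidSubSet subset out) := by unfold Spec_isValidSubSet; infer_instance

-- ===== CLAIM (what is proved, stated in full; the proofs are below) =====
def Claim_equal_isValidSubSet : Prop := ∀ (subset : List String), Dom_isValidSubSet subset → Spec_isValidSubSet subset (isValidSubSet subset)

-- ===== LEMMAS AND PROOFS =====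

-- A's loop returns true iff the non-dot elements are distinct and none is already a key of items
lemma goA_characterization (l : List String) (items : PySem.Dict String Bool) :
    isValidSubSetGo items l
      = decide ((l.filter (fun e => e ≠ ".")).Nodup ∧
          ∀ e ∈ l.filter (fun e => e ≠ "."), ¬ items.contains e) := by
  induction l generalizing items with
  | nil => simp [isValidSubSetGo]
  | cons e rest ih =>
    by_cases he : e = "."
    · subst he
      rw [show isValidSubSetGo items ("." :: rest) = isValidSubSetGo items rest from by
        simp [isValidSubSetGo]]
      rw [List.filter_cons_of_neg (by simp)]
      exact ih items
    · rw [show isValidSubSetGo items (e :: rest)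
            = if items.contains e then false
              else isValidSubSetGo (items.insert e true) rest from by
          simp [isValidSubSetGo, he]]
      rw [List.filter_cons_of_pos (by simp [he])]
      by_cases hc : items.contains e
      · rw [if_pos hc]
        symm
        rw [decide_eq_false_iff_not]
        rintro ⟨-, hall⟩
        exact hall e (List.mem_cons_self ..) hc
      · rw [if_neg hc, ih]
        rw [decide_eq_decide]
        constructor
        · rintro ⟨hF, hall⟩
          have heF : e ∉ rest.filter (fun e => e ≠ ".") := by
            intro hmem
            have := hall e hmem
            rw [PySem.Dict.contains_insert] at this
            simp at this
          refine ⟨List.nodup_cons.mpr ⟨heF, hF⟩, ?_⟩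
          intro x hx
          rcases List.mem_cons.mp hx with rfl | hx'
          · exact hc
          · have := hall x hx'
            rw [PySem.Dict.contains_insert] at this
            simp only [Bool.or_eq_true, beq_iff_eq] at this
            push Not at this
            exact this.2
        · rintro ⟨hF, hall⟩
          refine ⟨(List.nodup_cons.mp hF).2, ?_⟩
          intro x hx
          have hxe : x ≠ e := fun h => (List.nodup_cons.mp hF).1 (h ▸ hx)
          rw [PySem.Dict.contains_insert]
          simp only [Bool.or_eq_true, beq_iff_eq]
          push Not
          exact ⟨hxe, hall x (List.mem_cons_of_mem _ hx)⟩

-- B returns true iff the non-dot elements are pairwise distinct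
lemma altB_characterization (l : List String) :
    isValidSubSet_alt l = decide (l.filter (fun e => e ≠ ".")).Nodup := by
  induction l with
  | nil => simp [isValidSubSet_alt]
  | cons h rest ih =>
    by_cases he : h = "."
    · subst he
      rw [show isValidSubSet_alt ("." :: rest)
            = ((("." : String) == "." || !(rest.contains ".")) && isValidSubSet_alt rest) from rfl]
      rw [List.filter_cons_of_neg (by simp), ih]
      simp
    · rw [show isValidSubSet_alt (h :: rest)
            = ((h == "." || !(rest.contains h)) && isValidSubSet_alt rest) from rfl]
      rw [List.filter_cons_of_pos (by simp [he]), ih]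
      have hmem : h ∈ rest ↔ h ∈ rest.filter (fun e => e ≠ ".") := by
        simp [List.mem_filter, he]
      by_cases hr : h ∈ rest
      · have := hmem.mp hr
        simp [he, hr, List.nodup_cons, this]
      · have hnm : h ∉ rest.filter (fun e => e ≠ ".") := fun hm => hr (hmem.mpr hm)
        simp [he, hr, List.nodup_cons, hnm]

-- ===== VERDICT (by name: the statement is the Claim_ definition above) =====
theorem isValidSubSet_spec : Claim_equal_isValidSubSet := by
  intro subset _
  unfold Spec_isValidSubSet isValidSubSet
  rw [goA_characterization, altB_characterization, decide_eq_decide]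
  constructor
  · rintro ⟨h, -⟩
    exact h
  · intro h
    exact ⟨h, fun e _ => by simp [PySem.Dict.contains, PySem.Dict.empty]⟩
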